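-- pv_equiv track=rewrite | github.com/ohilikeit/Coding_Test_Practice | 프로그래머스/3/92344. 파괴되지 않은 건물/파괴되지 않은 건물.py | solution
-- ===== SOURCE A (Python) =====
-- def solution(board, skill):
--     answer = 0
--     R, C = len(board), len(board[0])
--     imos = [[0] * (C+1) for _ in range(R+1)]
--
--     for typ, r1, c1, r2, c2, degree in skill:
--         attack_heal = (-1) * degree if typ == 1 else degree
--
--         # imos 누적합, 4개의 모서리 중 처음과 끝을 제외한 중간 두 개는 마이너스
--         imos[r1][c1] += attack_heal
--         imos[r1][c2+1] -= attack_heal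
--         imos[r2+1][c1] -= attack_heal
--         imos[r2+1][c2+1] += attack_heal
--
--     # 누적합 계산하기
--     for i in range(R+1):
--         for j in range(1, C+1):
--             imos[i][j] += imos[i][j-1]
--     for j in range(C+1):
--         for i in range(1, R+1):
--             imos[i][j] += imos[i-1][j]
--
--     # 최종 계산 후 갯수 세기
--     for i in range(R):
--         for j in range(C):
--             board[i][j] += imos[i][j]
--             if board[i][j] > 0:
--                 answer += 1
--
--     return answer
-- ===== SOURCE B (Python) =====
-- def solution(board, skill):
--     # per-cell brute force: for each cell of the R x C grid, sum the deltas of the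
--     # skills whose rectangle covers it; count cells whose resulting value is positive.
--     # (Unlike A, does not mutate board; same return value.)
--     deltas = [(-d if t == 1 else d, r1, c1, r2, c2) for t, r1, c1, r2, c2, d in skill]
--     R, C = len(board), len(board[0])
--     return sum(1 for i in range(R) for j in range(C)
--                if board[i][j] + sum(d for d, r1, c1, r2, c2 in deltas
--                                     if r1 <= i <= r2 and c1 <= j <= c2) > 0)
-- ===== Notes on version B (the rewrite author's own statement) =====
-- stated objective: alternative
-- what changed: Replaces the 2-D imos difference array and its two prefix-sum passes by a direct per-cell query that sums, for each cell, the deltas of the skills whose rectangle covers it, counting positives in one comprehension-style pass without mutating board.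
-- outside the precondition, e.g. on solution([[0, 0], [3, 1], [2, 2]], [[2, -2, 0, -1, 0, 4]]): A returns 3, B returns 4; on solution([[-2, 0, -2], [-1, 1, -3]], [[2, 0, 2, 1, 0, 2]]): A returns 0, B returns 1
import Mathlib
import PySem

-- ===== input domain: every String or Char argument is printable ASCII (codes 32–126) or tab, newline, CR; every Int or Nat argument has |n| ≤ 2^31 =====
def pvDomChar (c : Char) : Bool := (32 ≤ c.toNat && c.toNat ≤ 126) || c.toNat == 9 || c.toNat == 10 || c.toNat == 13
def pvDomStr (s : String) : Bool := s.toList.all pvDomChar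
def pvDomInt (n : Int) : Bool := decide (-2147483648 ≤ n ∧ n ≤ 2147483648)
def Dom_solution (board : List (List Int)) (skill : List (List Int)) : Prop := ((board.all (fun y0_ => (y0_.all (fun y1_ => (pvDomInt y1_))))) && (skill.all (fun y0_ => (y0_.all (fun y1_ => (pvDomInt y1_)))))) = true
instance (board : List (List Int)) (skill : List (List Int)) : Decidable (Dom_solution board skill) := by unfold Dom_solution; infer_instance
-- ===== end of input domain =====

-- B replaces A's 2-D difference array (imos) + two prefix-sum passes by a direct per-cell
-- sum over the skills whose rectangle covers the cell. Return values are proved equal on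
-- Pre_; side effects differ: A mutates board in place, B does not (claim = return value).

-- ===== PORT A =====
-- g[i][j] += d  (exact for the 0 ≤ index < length accesses Pre_solution admits)
def pvAdd2 (g : List (List Int)) (i j : Nat) (d : Int) : List (List Int) :=
  g.modify i (fun row => row.modify j (· + d))

-- g[i][j] read (exact for the in-range accesses Pre_solution admits)
def pvVat (g : List (List Int)) (i j : Nat) : Int := (g.getD i []).getD j 0

-- the body of A's first loop: the four imos corner updates of one skill entry
def pvSkillStep (m : List (List Int)) (s : List Int) : List (List Int) :=
  match s with
  | [typ, r1, c1, r2, c2, degree] =>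
    let ah := if typ = 1 then (-1) * degree else degree
    let m := pvAdd2 m r1.toNat c1.toNat ah
    let m := pvAdd2 m r1.toNat (c2+1).toNat (-ah)
    let m := pvAdd2 m (r2+1).toNat c1.toNat (-ah)
    pvAdd2 m (r2+1).toNat (c2+1).toNat ah
  | _ => m

-- 'for i in range(R+1): for j in range(1, C+1): imos[i][j] += imos[i][j-1]'
def pvRowPass (m : List (List Int)) (R C : Nat) : List (List Int) :=
  (List.range (R+1)).foldl (fun m i =>
    (List.range C).foldl (fun m jm1 => pvAdd2 m i (jm1+1) (pvVat m i jm1)) m) m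

-- 'for j in range(C+1): for i in range(1, R+1): imos[i][j] += imos[i-1][j]'
def pvColPass (m : List (List Int)) (R C : Nat) : List (List Int) :=
  (List.range (C+1)).foldl (fun m j =>
    (List.range R).foldl (fun m im1 => pvAdd2 m (im1+1) j (pvVat m im1 j)) m) m

-- the final loop: add imos into board, counting positive cells
def pvCount (board T : List (List Int)) (R C : Nat) : Int × List (List Int) :=
  (List.range R).foldl (fun p i =>
    (List.range C).foldl (fun p j =>
      let b := pvAdd2 p.2 i j (pvVat T i j)
      (if pvVat b i j > 0 then p.1 + 1 else p.1, b)) p) ((0:Int), board)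

def solution (board : List (List Int)) (skill : List (List Int)) : Int :=
  let R := board.length
  let C := (board.headD []).length
  let imos0 := List.replicate (R+1) (List.replicate (C+1) (0:Int))
  let imos1 := skill.foldl pvSkillStep imos0
  (pvCount board (pvColPass (pvRowPass imos1 R C) R C) R C).1

-- ===== PORT B =====
-- the per-cell sum 'sum(d for d, r1, c1, r2, c2 in deltas if r1 <= i <= r2 and c1 <= j <= c2)'
def pvCellDelta (deltas : List (Int × Int × Int × Int × Int)) (i j : Int) : Int :=
  deltas.foldl (fun s t =>
    if t.2.1 ≤ i ∧ i ≤ t.2.2.2.1 ∧ t.2.2.1 ≤ j ∧ j ≤ t.2.2.2.2 then s + t.1 else s) 0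

def solution_alt (board : List (List Int)) (skill : List (List Int)) : Int :=
  let deltas := skill.map (fun s =>
    match s with
    | [t, r1, c1, r2, c2, d] => ((if t = 1 then -d else d), r1, c1, r2, c2)
    | _ => ((0:Int), (0:Int), (0:Int), (0:Int), (0:Int)))
  let R := board.length
  let C := (board.headD []).length
  (List.range R).foldl (fun a i =>
    (List.range C).foldl (fun a j =>
      if pvVat board i j + pvCellDelta deltas (i:Int) (j:Int) > 0 then a + 1 else a) a) 0

-- ===== PRECONDITION & SPEC =====
-- Pre_ restricts to the problem's natural domain: board nonempty with every row at least
-- C = len(board[0]) long (both programs work on the R x C grid), every skill a 6-tuple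
-- [typ, r1, c1, r2, c2, degree] whose rectangle satisfies 0 ≤ r1 ≤ r2 < R and
-- 0 ≤ c1 ≤ c2 < C. Outside it A either raises (empty board, a row shorter than C, wrong
-- arity, indices past the diff array) or returns a value that depends on negative-index
-- wraparound or swapped rectangle corners — malformed input, excluded.
def Pre_solution (board : List (List Int)) (skill : List (List Int)) : Prop :=
  board ≠ [] ∧ (∀ row ∈ board, (board.headD []).length ≤ row.length) ∧
  ∀ s ∈ skill, s.length = 6 ∧
    0 ≤ s.getD 1 0 ∧ s.getD 1 0 ≤ s.getD 3 0 ∧ s.getD 3 0 < (board.length : Int) ∧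
    0 ≤ s.getD 2 0 ∧ s.getD 2 0 ≤ s.getD 4 0 ∧ s.getD 4 0 < ((board.headD []).length : Int)
instance (board : List (List Int)) (skill : List (List Int)) : Decidable (Pre_solution board skill) := by unfold Pre_solution; infer_instance

def pvWitness_solution : List (List Int) × List (List Int) :=
  ([[1, -2], [0, 3]], [[1, 0, 0, 1, 1, 2], [2, 0, 1, 0, 1, 5]])

def Spec_solution (board : List (List Int)) (skill : List (List Int)) (out : Int) : Prop := out = solution_alt board skill
instance (board : List (List Int)) (skill : List (List Int)) (out : Int) : Decidable (Spec_solution board skill out) := by unfold Spec_solution; infer_instance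

-- ===== CLAIM (what is proved, stated in full; the proofs are below) =====
def Claim_equal_solution : Prop := ∀ (board : List (List Int)) (skill : List (List Int)), Dom_solution board skill → Pre_solution board skill → Spec_solution board skill (solution board skill)

-- ===== LEMMAS AND PROOFS =====

-- a grid of r rows, each of length c
def pvRect (g : List (List Int)) (r c : Nat) : Prop :=
  g.length = r ∧ ∀ k, k < r → (g.getD k []).length = c

-- the four-corner contribution of one skill entry to the diff array, in product form
def pvCorner (s : List Int) (i j : Nat) : Int :=
  match s with
  | [t, r1, c1, r2, c2, d] =>
    (if t = 1 then (-1)*d else d) *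
    ((if (i:Int) = r1 then 1 else 0) - (if (i:Int) = r2+1 then 1 else 0)) *
    ((if (j:Int) = c1 then 1 else 0) - (if (j:Int) = c2+1 then 1 else 0))
  | _ => 0

-- the per-entry shape condition Pre_solution imposes, relative to grid dimensions R, C
def pvOk (s : List Int) (R C : Nat) : Prop :=
  s.length = 6 ∧ 0 ≤ s.getD 1 0 ∧ s.getD 1 0 ≤ s.getD 3 0 ∧ s.getD 3 0 < (R:Int) ∧
  0 ≤ s.getD 2 0 ∧ s.getD 2 0 ≤ s.getD 4 0 ∧ s.getD 4 0 < (C:Int)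


theorem pvGetD_modify {α : Type} (l : List α) (n m : Nat) (f : α → α) (d : α) :
    (l.modify n f).getD m d = if n = m ∧ m < l.length then f (l.getD m d) else l.getD m d := by
  rw [List.getD_eq_getElem?_getD, List.getElem?_modify, List.getD_eq_getElem?_getD]
  by_cases hm : m < l.length
  · rw [List.getElem?_eq_getElem hm]
    by_cases hnm : n = m <;> simp [hnm, hm]
  · rw [List.getElem?_eq_none (by omega)]
    simp [hm]

-- a grid of r rows, each of length at least c
def pvRectGe (g : List (List Int)) (r c : Nat) : Prop :=
  g.length = r ∧ ∀ k, k < r → c ≤ (g.getD k []).length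

theorem pvRectGe_add2 {g : List (List Int)} {r c : Nat} (h : pvRectGe g r c) (a b : Nat) (d : Int) :
    pvRectGe (pvAdd2 g a b d) r c := by
  obtain ⟨hL, hW⟩ := h
  refine ⟨by simpa [pvAdd2] using hL, fun k hk => ?_⟩
  unfold pvAdd2
  rw [pvGetD_modify]
  split_ifs with hc
  · rw [List.length_modify]; exact hW k hk
  · exact hW k hk

theorem pvVat_add2' {g : List (List Int)} {a b : Nat}
    (ha : a < g.length) (hb : b < (g.getD a []).length) (d : Int) (i j : Nat) :
    pvVat (pvAdd2 g a b d) i j = pvVat g i j + (if i = a ∧ j = b then d else 0) := by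
  unfold pvVat pvAdd2
  rw [pvGetD_modify]
  by_cases hia : a = i
  · subst hia
    rw [if_pos ⟨rfl, ha⟩, pvGetD_modify]
    by_cases hjb : b = j
    · subst hjb
      rw [if_pos ⟨rfl, hb⟩]
      simp
    · rw [if_neg (by tauto)]
      rw [if_neg (by tauto)]
      simp
  · rw [if_neg (by tauto), if_neg (by tauto)]
    simp

theorem pvRect_add2 {g : List (List Int)} {r c : Nat} (h : pvRect g r c) (a b : Nat) (d : Int) :
    pvRect (pvAdd2 g a b d) r c := by
  obtain ⟨hL, hW⟩ := h
  refine ⟨by simpa [pvAdd2] using hL, fun k hk => ?_⟩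
  unfold pvAdd2
  rw [pvGetD_modify]
  split_ifs with hc
  · rw [List.length_modify]; exact hW k hk
  · exact hW k hk

theorem pvVat_add2 {g : List (List Int)} {r c : Nat} (h : pvRect g r c)
    {a b : Nat} (ha : a < r) (hb : b < c) (d : Int) (i j : Nat) :
    pvVat (pvAdd2 g a b d) i j = pvVat g i j + (if i = a ∧ j = b then d else 0) := by
  obtain ⟨hL, hW⟩ := h
  exact pvVat_add2' (by omega) (by have := hW a (by omega); omega) d i j

theorem pvIte_and (a b : Prop) [Decidable a] [Decidable b] (x : Int) :
    (if a ∧ b then x else 0) = x * (if a then 1 else 0) * (if b then 1 else 0) := by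
  split_ifs <;> simp_all

theorem pvVat_skillStep {m : List (List Int)} {R C : Nat} (hm : pvRect m (R+1) (C+1))
    {s : List Int} (hs : pvOk s R C) (i j : Nat) :
    pvVat (pvSkillStep m s) i j = pvVat m i j + pvCorner s i j := by
  obtain ⟨h6, hr1, hrr, hrR, hc1, hcc, hcC⟩ := hs
  obtain ⟨t, r1, c1, r2, c2, d, rfl⟩ : ∃ t r1 c1 r2 c2 d, s = [t, r1, c1, r2, c2, d] := by
    match s, h6 with | [a, b, c, d', e, f], _ => exact ⟨_, _, _, _, _, _, rfl⟩
  simp only [List.getD_cons_succ, List.getD_cons_zero] at hr1 hrr hrR hc1 hcc hcC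
  have hm1 := pvRect_add2 hm r1.toNat c1.toNat (if t = 1 then (-1) * d else d)
  have hm2 := pvRect_add2 hm1 r1.toNat (c2+1).toNat (-(if t = 1 then (-1) * d else d))
  have hm3 := pvRect_add2 hm2 (r2+1).toNat c1.toNat (-(if t = 1 then (-1) * d else d))
  show pvVat (pvAdd2 _ _ _ _) i j = _
  rw [pvVat_add2 hm3 (a := (r2+1).toNat) (b := (c2+1).toNat) (by omega) (by omega),
      pvVat_add2 hm2 (a := (r2+1).toNat) (b := c1.toNat) (by omega) (by omega),
      pvVat_add2 hm1 (a := r1.toNat) (b := (c2+1).toNat) (by omega) (by omega),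
      pvVat_add2 hm (a := r1.toNat) (b := c1.toNat) (by omega) (by omega)]
  have e1 : (i = r1.toNat) ↔ ((i:Int) = r1) := by omega
  have e2 : (i = (r2+1).toNat) ↔ ((i:Int) = r2+1) := by omega
  have e3 : (j = c1.toNat) ↔ ((j:Int) = c1) := by omega
  have e4 : (j = (c2+1).toNat) ↔ ((j:Int) = c2+1) := by omega
  simp only [pvCorner, e1, e2, e3, e4, pvIte_and]
  ring

theorem pvRect_skillStep {m : List (List Int)} {R C : Nat} (hm : pvRect m (R+1) (C+1))
    (s : List Int) : pvRect (pvSkillStep m s) (R+1) (C+1) := by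
  unfold pvSkillStep
  split
  · exact pvRect_add2 (pvRect_add2 (pvRect_add2 (pvRect_add2 hm _ _ _) _ _ _) _ _ _) _ _ _
  · exact hm

theorem pvVat_skillFold {R C : Nat} (skill : List (List Int))
    (hsk : ∀ s ∈ skill, pvOk s R C) (m : List (List Int)) (hm : pvRect m (R+1) (C+1)) (i j : Nat) :
    pvVat (skill.foldl pvSkillStep m) i j
      = pvVat m i j + (skill.map (fun s => pvCorner s i j)).sum := by
  induction skill generalizing m with
  | nil => simp
  | cons s rest ih =>
    rw [List.foldl_cons, ih (fun x hx => hsk x (List.mem_cons_of_mem _ hx)) _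
          (pvRect_skillStep hm s),
        pvVat_skillStep hm (hsk s List.mem_cons_self)]
    simp only [List.map_cons, List.sum_cons]
    ring

theorem pvRect_skillFold {R C : Nat} (skill : List (List Int)) (m : List (List Int))
    (hm : pvRect m (R+1) (C+1)) : pvRect (skill.foldl pvSkillStep m) (R+1) (C+1) := by
  induction skill generalizing m with
  | nil => exact hm
  | cons s rest ih => exact ih _ (pvRect_skillStep hm s)

theorem pvRowInner {R C : Nat} (i : Nat) (hi : i < R+1) (m : List (List Int))
    (hm : pvRect m (R+1) (C+1)) :
    ∀ n, n ≤ C →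
      pvRect ((List.range n).foldl (fun m jm1 => pvAdd2 m i (jm1+1) (pvVat m i jm1)) m) (R+1) (C+1) ∧
      ∀ i' j', j' < C+1 →
        pvVat ((List.range n).foldl (fun m jm1 => pvAdd2 m i (jm1+1) (pvVat m i jm1)) m) i' j'
          = if i' = i ∧ j' ≤ n then ∑ k ∈ Finset.range (j'+1), pvVat m i k else pvVat m i' j' := by
  intro n
  induction n with
  | zero =>
    intro _
    refine ⟨hm, fun i' j' hj' => ?_⟩
    simp only [List.range_zero, List.foldl_nil]
    split_ifs with h
    · obtain ⟨rfl, hj0⟩ := h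
      have : j' = 0 := by omega
      subst this
      rw [Finset.sum_range_one]
    · rfl
  | succ n ih =>
    intro hn
    obtain ⟨hrect, hv⟩ := ih (by omega)
    rw [List.range_succ, List.foldl_append, List.foldl_cons, List.foldl_nil]
    refine ⟨pvRect_add2 hrect _ _ _, fun i' j' hj' => ?_⟩
    rw [pvVat_add2 hrect (a := i) (b := n+1) hi (by omega), hv i' j' hj', hv i n (by omega)]
    by_cases hc : i' = i ∧ j' = n+1
    · obtain ⟨h1, h2⟩ := hc
      subst h2
      rw [h1]
      rw [if_neg (show ¬(i = i ∧ n+1 ≤ n) by omega),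
          if_pos (show i = i ∧ n+1 = n+1 from ⟨rfl, rfl⟩),
          if_pos (show i = i ∧ n ≤ n from ⟨rfl, le_refl n⟩),
          if_pos (show i = i ∧ n+1 ≤ n+1 from ⟨rfl, le_refl _⟩)]
      simp only [Finset.sum_range_succ]
      ring
    · rw [if_neg (show ¬(i' = i ∧ j' = n+1) from hc)]
      by_cases hd : i' = i ∧ j' ≤ n
      · rw [if_pos hd, if_pos (show i' = i ∧ j' ≤ n+1 from ⟨hd.1, by omega⟩)]
        ring
      · rw [if_neg hd, if_neg (show ¬(i' = i ∧ j' ≤ n+1) by omega)]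
        ring

theorem pvRowPass_vat {R C : Nat} {m : List (List Int)} (hm : pvRect m (R+1) (C+1)) :
    pvRect (pvRowPass m R C) (R+1) (C+1) ∧
    ∀ i j, i < R+1 → j < C+1 →
      pvVat (pvRowPass m R C) i j = ∑ j' ∈ Finset.range (j+1), pvVat m i j' := by
  have aux : ∀ n, n ≤ R+1 →
      pvRect ((List.range n).foldl (fun m i =>
          (List.range C).foldl (fun m jm1 => pvAdd2 m i (jm1+1) (pvVat m i jm1)) m) m) (R+1) (C+1) ∧
      ∀ i j, i < R+1 → j < C+1 →
        pvVat ((List.range n).foldl (fun m i =>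
            (List.range C).foldl (fun m jm1 => pvAdd2 m i (jm1+1) (pvVat m i jm1)) m) m) i j
          = if i < n then ∑ j' ∈ Finset.range (j+1), pvVat m i j' else pvVat m i j := by
    intro n
    induction n with
    | zero => exact fun _ => ⟨hm, fun i j _ _ => by simp⟩
    | succ n ih =>
      intro hn
      obtain ⟨hrect, hv⟩ := ih (by omega)
      rw [List.range_succ, List.foldl_append, List.foldl_cons, List.foldl_nil]
      obtain ⟨hrect', hv'⟩ := pvRowInner n (by omega) _ hrect C (le_refl C)
      refine ⟨hrect', fun i j hiR hjC => ?_⟩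
      rw [hv' i j hjC]
      by_cases hc : i = n
      · subst hc
        rw [if_pos ⟨rfl, by omega⟩, if_pos (by omega)]
        refine Finset.sum_congr rfl fun k hk => ?_
        rw [hv i k hiR (by simp at hk; omega), if_neg (by omega)]
      · rw [if_neg (by tauto), hv i j hiR hjC]
        by_cases hd : i < n
        · rw [if_pos hd, if_pos (by omega)]
        · rw [if_neg hd, if_neg (by omega)]
  obtain ⟨h1, h2⟩ := aux (R+1) (le_refl _)
  refine ⟨h1, fun i j hi hj => ?_⟩
  rw [pvRowPass] at *
  rw [h2 i j hi hj, if_pos hi]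

theorem pvColInner {R C : Nat} (j : Nat) (hj : j < C+1) (m : List (List Int))
    (hm : pvRect m (R+1) (C+1)) :
    ∀ n, n ≤ R →
      pvRect ((List.range n).foldl (fun m im1 => pvAdd2 m (im1+1) j (pvVat m im1 j)) m) (R+1) (C+1) ∧
      ∀ i' j', i' < R+1 →
        pvVat ((List.range n).foldl (fun m im1 => pvAdd2 m (im1+1) j (pvVat m im1 j)) m) i' j'
          = if j' = j ∧ i' ≤ n then ∑ k ∈ Finset.range (i'+1), pvVat m k j else pvVat m i' j' := by
  intro n
  induction n with
  | zero =>
    intro _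
    refine ⟨hm, fun i' j' hi' => ?_⟩
    simp only [List.range_zero, List.foldl_nil]
    split_ifs with h
    · obtain ⟨rfl, hi0⟩ := h
      have : i' = 0 := by omega
      subst this
      rw [Finset.sum_range_one]
    · rfl
  | succ n ih =>
    intro hn
    obtain ⟨hrect, hv⟩ := ih (by omega)
    rw [List.range_succ, List.foldl_append, List.foldl_cons, List.foldl_nil]
    refine ⟨pvRect_add2 hrect _ _ _, fun i' j' hi' => ?_⟩
    rw [pvVat_add2 hrect (a := n+1) (b := j) (by omega) hj, hv i' j' hi', hv n j (by omega)]
    by_cases hc : i' = n+1 ∧ j' = j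
    · obtain ⟨h1, h2⟩ := hc
      subst h1
      rw [h2]
      rw [if_neg (show ¬(j = j ∧ n+1 ≤ n) by omega),
          if_pos (show n+1 = n+1 ∧ j = j from ⟨rfl, rfl⟩),
          if_pos (show j = j ∧ n ≤ n from ⟨rfl, le_refl n⟩),
          if_pos (show j = j ∧ n+1 ≤ n+1 from ⟨rfl, le_refl _⟩)]
      simp only [Finset.sum_range_succ]
      ring
    · rw [if_neg (show ¬(i' = n+1 ∧ j' = j) from hc)]
      by_cases hd : j' = j ∧ i' ≤ n
      · rw [if_pos hd, if_pos (show j' = j ∧ i' ≤ n+1 from ⟨hd.1, by omega⟩)]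
        ring
      · rw [if_neg hd, if_neg (show ¬(j' = j ∧ i' ≤ n+1) by omega)]
        ring

theorem pvColPass_vat {R C : Nat} {m : List (List Int)} (hm : pvRect m (R+1) (C+1)) :
    pvRect (pvColPass m R C) (R+1) (C+1) ∧
    ∀ i j, i < R+1 → j < C+1 →
      pvVat (pvColPass m R C) i j = ∑ i' ∈ Finset.range (i+1), pvVat m i' j := by
  have aux : ∀ n, n ≤ C+1 →
      pvRect ((List.range n).foldl (fun m j =>
          (List.range R).foldl (fun m im1 => pvAdd2 m (im1+1) j (pvVat m im1 j)) m) m) (R+1) (C+1) ∧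
      ∀ i j, i < R+1 → j < C+1 →
        pvVat ((List.range n).foldl (fun m j =>
            (List.range R).foldl (fun m im1 => pvAdd2 m (im1+1) j (pvVat m im1 j)) m) m) i j
          = if j < n then ∑ i' ∈ Finset.range (i+1), pvVat m i' j else pvVat m i j := by
    intro n
    induction n with
    | zero => exact fun _ => ⟨hm, fun i j _ _ => by simp⟩
    | succ n ih =>
      intro hn
      obtain ⟨hrect, hv⟩ := ih (by omega)
      rw [List.range_succ, List.foldl_append, List.foldl_cons, List.foldl_nil]
      obtain ⟨hrect', hv'⟩ := pvColInner n (by omega) _ hrect R (le_refl R)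
      refine ⟨hrect', fun i j hiR hjC => ?_⟩
      rw [hv' i j hiR]
      by_cases hc : j = n
      · subst hc
        rw [if_pos ⟨rfl, by omega⟩, if_pos (by omega)]
        refine Finset.sum_congr rfl fun k hk => ?_
        rw [hv k j (by simp at hk; omega) hjC, if_neg (by omega)]
      · rw [if_neg (by tauto), hv i j hiR hjC]
        by_cases hd : j < n
        · rw [if_pos hd, if_pos (by omega)]
        · rw [if_neg hd, if_neg (by omega)]
  obtain ⟨h1, h2⟩ := aux (C+1) (le_refl _)
  refine ⟨h1, fun i j hi hj => ?_⟩
  rw [pvColPass] at *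
  rw [h2 i j hi hj, if_pos hj]

def pvCInner (T : List (List Int)) (i : Nat) (n : Nat) (p : Int × List (List Int)) :
    Int × List (List Int) :=
  (List.range n).foldl (fun p j =>
    let b := pvAdd2 p.2 i j (pvVat T i j)
    (if pvVat b i j > 0 then p.1 + 1 else p.1, b)) p

theorem pvCount_eq (board T : List (List Int)) (R C : Nat) :
    pvCount board T R C = (List.range R).foldl (fun p i => pvCInner T i C p) ((0:Int), board) := rfl

theorem pvCInner_spec {R C : Nat} (T : List (List Int)) (i : Nat) (hi : i < R) :
    ∀ n, n ≤ C → ∀ (a : Int) (b0 : List (List Int)), pvRectGe b0 R C →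
      ((pvCInner T i n (a, b0)).1
        = a + ∑ j ∈ Finset.range n, (if pvVat b0 i j + pvVat T i j > 0 then (1:Int) else 0)) ∧
      pvRectGe (pvCInner T i n (a, b0)).2 R C ∧
      ∀ i' j', (i' ≠ i ∨ n ≤ j') → pvVat (pvCInner T i n (a, b0)).2 i' j' = pvVat b0 i' j' := by
  intro n
  induction n with
  | zero => exact fun _ a b0 hb0 => ⟨by simp [pvCInner], hb0, fun i' j' _ => rfl⟩
  | succ n ih =>
    intro hn a b0 hb0
    obtain ⟨hfst, hrect, hunch⟩ := ih (by omega) a b0 hb0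
    have hstep : pvCInner T i (n+1) (a, b0)
        = (if pvVat (pvAdd2 (pvCInner T i n (a, b0)).2 i n (pvVat T i n)) i n > 0
             then (pvCInner T i n (a, b0)).1 + 1 else (pvCInner T i n (a, b0)).1,
           pvAdd2 (pvCInner T i n (a, b0)).2 i n (pvVat T i n)) := by
      rw [pvCInner, List.range_succ, List.foldl_append, List.foldl_cons, List.foldl_nil]
      rfl
    have hval : pvVat (pvAdd2 (pvCInner T i n (a, b0)).2 i n (pvVat T i n)) i n
        = pvVat b0 i n + pvVat T i n := by
      rw [pvVat_add2' (a := i) (b := n) (by rw [hrect.1]; exact hi)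
            (by have := hrect.2 i hi; omega) _ i n,
          if_pos (show i = i ∧ n = n from ⟨rfl, rfl⟩), hunch i n (Or.inr (le_refl n))]
    rw [hstep]
    refine ⟨?_, pvRectGe_add2 hrect _ _ _, ?_⟩
    · show (if _ > 0 then _ + 1 else _) = _
      rw [hval, hfst, Finset.sum_range_succ]
      split_ifs <;> ring
    · intro i' j' h
      show pvVat (pvAdd2 _ i n (pvVat T i n)) i' j' = _
      rw [pvVat_add2' (a := i) (b := n) (by rw [hrect.1]; exact hi)
            (by have := hrect.2 i hi; omega) _ i' j',
          if_neg (show ¬(i' = i ∧ j' = n) by omega), add_zero,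
          hunch i' j' (by omega)]

theorem pvCount_fst {R C : Nat} {board : List (List Int)} (hb : pvRectGe board R C)
    (T : List (List Int)) :
    (pvCount board T R C).1
      = ∑ i ∈ Finset.range R, ∑ j ∈ Finset.range C,
          (if pvVat board i j + pvVat T i j > 0 then (1:Int) else 0) := by
  have aux : ∀ n, n ≤ R →
      (((List.range n).foldl (fun p i => pvCInner T i C p) ((0:Int), board)).1
        = ∑ i ∈ Finset.range n, ∑ j ∈ Finset.range C,
            (if pvVat board i j + pvVat T i j > 0 then (1:Int) else 0)) ∧
      pvRectGe ((List.range n).foldl (fun p i => pvCInner T i C p) ((0:Int), board)).2 R C ∧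
      ∀ i' j', n ≤ i' →
        pvVat ((List.range n).foldl (fun p i => pvCInner T i C p) ((0:Int), board)).2 i' j'
          = pvVat board i' j' := by
    intro n
    induction n with
    | zero => exact fun _ => ⟨by simp, hb, fun i' j' _ => rfl⟩
    | succ n ih =>
      intro hn
      obtain ⟨hfst, hrect, hunch⟩ := ih (by omega)
      rw [List.range_succ, List.foldl_append, List.foldl_cons, List.foldl_nil]
      obtain ⟨ifst, irect, iunch⟩ := pvCInner_spec T n (by omega) C (le_refl C)
        ((List.range n).foldl (fun p i => pvCInner T i C p) ((0:Int), board)).1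
        ((List.range n).foldl (fun p i => pvCInner T i C p) ((0:Int), board)).2
        hrect
      refine ⟨?_, ?_, ?_⟩
      · rw [ifst, hfst, Finset.sum_range_succ]
        congr 1
        refine Finset.sum_congr rfl fun j hj => ?_
        rw [hunch n j (le_refl n)]
      · exact irect
      · intro i' j' h
        rw [iunch i' j' (Or.inl (by omega)), hunch i' j' (by omega)]
  rw [pvCount_eq]
  exact (aux R (le_refl R)).1

-- indicator sums
theorem pvSum_ite_cast (n : Nat) (a x : Int) :
    (∑ k ∈ Finset.range n, if (k:Int) = a then x else 0)
      = if 0 ≤ a ∧ a < (n:Int) then x else 0 := by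
  induction n with
  | zero => rw [Finset.range_zero, Finset.sum_empty, if_neg (by omega)]
  | succ n ih =>
    rw [Finset.sum_range_succ, ih]
    split_ifs <;> first | (exfalso; omega) | ring

theorem pvCorner_prefix {R C : Nat} {s : List Int} (hs : pvOk s R C) (i j : Nat) :
    (∑ i' ∈ Finset.range (i+1), ∑ j' ∈ Finset.range (j+1), pvCorner s i' j')
      = if s.getD 1 0 ≤ (i:Int) ∧ (i:Int) ≤ s.getD 3 0 ∧ s.getD 2 0 ≤ (j:Int) ∧ (j:Int) ≤ s.getD 4 0
        then (if s.getD 0 0 = 1 then -(s.getD 5 0) else s.getD 5 0) else 0 := by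
  obtain ⟨h6, hr1, hrr, hrR, hc1, hcc, hcC⟩ := hs
  obtain ⟨t, r1, c1, r2, c2, d, rfl⟩ : ∃ t r1 c1 r2 c2 d, s = [t, r1, c1, r2, c2, d] := by
    match s, h6 with | [a, b, c, d', e, f], _ => exact ⟨_, _, _, _, _, _, rfl⟩
  simp only [List.getD_cons_succ, List.getD_cons_zero] at *
  have inner : ∀ i' : Nat, (∑ j' ∈ Finset.range (j+1), pvCorner [t, r1, c1, r2, c2, d] i' j')
      = (if t = 1 then (-1)*d else d)
        * ((if (i':Int) = r1 then 1 else 0) - (if (i':Int) = r2+1 then 1 else 0))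
        * ((if 0 ≤ c1 ∧ c1 < ((j+1:Nat):Int) then 1 else 0)
            - (if 0 ≤ c2+1 ∧ c2+1 < ((j+1:Nat):Int) then 1 else 0)) := by
    intro i'
    simp only [pvCorner]
    rw [← Finset.mul_sum, Finset.sum_sub_distrib, pvSum_ite_cast, pvSum_ite_cast]
  simp only [inner]
  rw [← Finset.sum_mul, ← Finset.mul_sum, Finset.sum_sub_distrib, pvSum_ite_cast, pvSum_ite_cast]
  split_ifs <;> first | (exfalso; omega) | ring

theorem pvSum_commute {α : Type} (l : List α) (F : α → Nat → Int) (n : Nat) :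
    (∑ k ∈ Finset.range n, (l.map (fun s => F s k)).sum)
      = (l.map (fun s => ∑ k ∈ Finset.range n, F s k)).sum := by
  induction l with
  | nil => simp
  | cons x xs ih => simp [Finset.sum_add_distrib, ih]

theorem pvCellDelta_aux (deltas : List (Int × Int × Int × Int × Int)) (i j : Int) :
    ∀ acc : Int,
      deltas.foldl (fun s t =>
          if t.2.1 ≤ i ∧ i ≤ t.2.2.2.1 ∧ t.2.2.1 ≤ j ∧ j ≤ t.2.2.2.2 then s + t.1 else s) acc
        = acc + (deltas.map (fun t =>
            if t.2.1 ≤ i ∧ i ≤ t.2.2.2.1 ∧ t.2.2.1 ≤ j ∧ j ≤ t.2.2.2.2 then t.1 else 0)).sum := by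
  induction deltas with
  | nil => simp
  | cons x xs ih =>
    intro acc
    simp only [List.foldl_cons, List.map_cons, List.sum_cons, ih]
    split_ifs <;> ring

theorem pvCellDelta_foldl (deltas : List (Int × Int × Int × Int × Int)) (i j : Int) :
    pvCellDelta deltas i j
      = (deltas.map (fun t =>
          if t.2.1 ≤ i ∧ i ≤ t.2.2.2.1 ∧ t.2.2.1 ≤ j ∧ j ≤ t.2.2.2.2 then t.1 else 0)).sum := by
  unfold pvCellDelta
  rw [pvCellDelta_aux]
  ring

theorem pvFoldCountRow (g : Nat → Int) : ∀ (n : Nat) (a : Int),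
    (List.range n).foldl (fun a j => if g j > 0 then a + 1 else a) a
      = a + ∑ j ∈ Finset.range n, (if g j > 0 then (1:Int) else 0) := by
  intro n
  induction n with
  | zero => intro a; simp
  | succ n ih =>
    intro a
    rw [List.range_succ, List.foldl_append, List.foldl_cons, List.foldl_nil, ih,
        Finset.sum_range_succ]
    split_ifs <;> ring

theorem pvFoldCountGrid (h : Nat → Nat → Int) (C : Nat) : ∀ (n : Nat) (a : Int),
    (List.range n).foldl (fun a i =>
        (List.range C).foldl (fun a j => if h i j > 0 then a + 1 else a) a) a
      = a + ∑ i ∈ Finset.range n, ∑ j ∈ Finset.range C, (if h i j > 0 then (1:Int) else 0) := by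
  intro n
  induction n with
  | zero => intro a; simp
  | succ n ih =>
    intro a
    rw [List.range_succ, List.foldl_append, List.foldl_cons, List.foldl_nil, ih,
        pvFoldCountRow (h n) C, Finset.sum_range_succ]
    ring

theorem pvAlt_eq (board : List (List Int)) (skill : List (List Int)) :
    solution_alt board skill
      = ∑ i ∈ Finset.range board.length, ∑ j ∈ Finset.range (board.headD []).length,
          (if pvVat board i j
              + pvCellDelta (skill.map (fun s =>
                  match s with
                  | [t, r1, c1, r2, c2, d] => ((if t = 1 then -d else d), r1, c1, r2, c2)
                  | _ => ((0:Int), (0:Int), (0:Int), (0:Int), (0:Int)))) (i:Int) (j:Int) > 0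
           then (1:Int) else 0) := by
  have h := pvFoldCountGrid (fun i j => pvVat board i j
      + pvCellDelta (skill.map (fun s =>
          match s with
          | [t, r1, c1, r2, c2, d] => ((if t = 1 then -d else d), r1, c1, r2, c2)
          | _ => ((0:Int), (0:Int), (0:Int), (0:Int), (0:Int)))) (i:Int) (j:Int))
    (board.headD []).length board.length 0
  rw [zero_add] at h
  exact h

theorem pvVat_replicate (R C : Nat) (i j : Nat) :
    pvVat (List.replicate (R+1) (List.replicate (C+1) (0:Int))) i j = 0 := by
  have hrow : ∀ (l : List Int) (n i : Nat), (List.replicate n l).getD i [] = if i < n then l else [] := by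
    intro l n i
    rw [List.getD_eq_getElem?_getD, List.getElem?_replicate]
    split_ifs <;> rfl
  unfold pvVat
  rw [hrow]
  split_ifs with h
  · rw [List.getD_eq_getElem?_getD, List.getElem?_replicate]
    split_ifs <;> rfl
  · rfl

theorem solution_spec : Claim_equal_solution := by
  intro board skill _ hpre
  obtain ⟨hne, hrows, hsk⟩ := hpre
  unfold Spec_solution
  have hb : pvRectGe board board.length (board.headD []).length := by
    refine ⟨rfl, fun k hk => ?_⟩
    rw [List.getD_eq_getElem?_getD, List.getElem?_eq_getElem hk]
    exact hrows _ (List.getElem_mem hk)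
  set R := board.length with hR
  set C := (board.headD []).length with hC
  have hsk' : ∀ s ∈ skill, pvOk s R C := fun s hs => hsk s hs
  have him0 : pvRect (List.replicate (R+1) (List.replicate (C+1) (0:Int))) (R+1) (C+1) := by
    refine ⟨List.length_replicate, fun k hk => ?_⟩
    rw [List.getD_eq_getElem?_getD, List.getElem?_replicate, if_pos hk]
    simp only [Option.getD_some, List.length_replicate]
  have hsol : solution board skill
      = (pvCount board (pvColPass (pvRowPass
          (skill.foldl pvSkillStep (List.replicate (R+1) (List.replicate (C+1) (0:Int))))
          R C) R C) R C).1 := rfl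
  rw [hsol]
  have hrect1 := pvRect_skillFold skill _ him0
  obtain ⟨hrect2, h2⟩ := pvRowPass_vat hrect1
  obtain ⟨hrect3, h3⟩ := pvColPass_vat hrect2
  rw [pvCount_fst hb _, pvAlt_eq board skill]
  refine Finset.sum_congr rfl fun i hi => Finset.sum_congr rfl fun j hj => ?_
  have hiR : i < R := Finset.mem_range.mp hi
  have hjC : j < C := Finset.mem_range.mp hj
  have hT : pvVat (pvColPass (pvRowPass
        (skill.foldl pvSkillStep (List.replicate (R+1) (List.replicate (C+1) (0:Int))))
        R C) R C) i j
      = pvCellDelta (skill.map (fun s =>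
          match s with
          | [t, r1, c1, r2, c2, d] => ((if t = 1 then -d else d), r1, c1, r2, c2)
          | _ => ((0:Int), (0:Int), (0:Int), (0:Int), (0:Int)))) (i:Int) (j:Int) := by
    rw [h3 i j (by omega) (by omega)]
    rw [Finset.sum_congr rfl (fun i' hi' =>
      h2 i' j (by have := Finset.mem_range.mp hi'; omega) (by omega))]
    have hv1 : ∀ i' j' : Nat,
        pvVat (skill.foldl pvSkillStep (List.replicate (R+1) (List.replicate (C+1) (0:Int)))) i' j'
          = (skill.map (fun s => pvCorner s i' j')).sum := by
      intro i' j'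
      rw [pvVat_skillFold skill hsk' _ him0, pvVat_replicate, zero_add]
    rw [Finset.sum_congr rfl (fun i' _ =>
      Finset.sum_congr rfl (fun j' _ => hv1 i' j'))]
    rw [Finset.sum_congr rfl (fun i' _ =>
      pvSum_commute skill (fun s j' => pvCorner s i' j') (j+1))]
    rw [pvSum_commute skill (fun s i' => ∑ j' ∈ Finset.range (j+1), pvCorner s i' j') (i+1)]
    rw [pvCellDelta_foldl, List.map_map]
    refine congrArg List.sum (List.map_congr_left fun s hs => ?_)
    rw [pvCorner_prefix (hsk' s hs) i j]
    obtain ⟨h6, _⟩ := hsk' s hs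
    obtain ⟨t, r1, c1, r2, c2, d, rfl⟩ : ∃ t r1 c1 r2 c2 d, s = [t, r1, c1, r2, c2, d] := by
      match s, h6 with | [a, b, c, d', e, f], _ => exact ⟨_, _, _, _, _, _, rfl⟩
    simp [Function.comp]
  rw [hT]
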